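-- pv_equiv track=rewrite | github.com/jtgjohn/OpSys | project2/project2.py | defragment
-- ===== SOURCE A (Python) =====
-- def defragment(mem, tmemmove):
-- 	#keep track of cost and changes
-- 	movecost = 0
-- 	changed = []
-- 	#go through memory
-- 	for i in range(len(mem)):
-- 		#if the memory is free
-- 		if mem[i] == ".":
-- 			#go through the rest of the memory
-- 			for j in range(i+1, len(mem)):
-- 				#if the frame isn't empty
-- 				if mem[j] != ".":
-- 					#keep track of what's changed and move the info
-- 					if mem[j] not in changed:
-- 						changed.append(mem[j])
-- 					mem[i] = mem[j]
-- 					mem[j] = "."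
-- 					movecost += tmemmove
-- 					break
--
-- 	#return the total cost and what moved
-- 	return movecost, changed
-- ===== SOURCE B (Python) =====
-- def defragment(mem, tmemmove):
--     # Single pass: once a free frame has been seen, every later occupied frame
--     # is moved exactly once; count it and record its label (dedup via a set).
--     # Unlike the original, this does not mutate mem; the return value is identical.
--     movecost = 0
--     changed = []
--     seen = set()
--     free_seen = False
--     for x in mem:
--         if x == ".":
--             free_seen = True
--         elif free_seen:
--             movecost += tmemmove
--             if x not in seen:
--                 seen.add(x)
--                 changed.append(x)
--     return movecost, changed
-- ===== Notes on version B (the rewrite author's own statement) =====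
-- stated objective: simpler
-- what changed: Replaced the nested in-place scan (for each free slot, search right for the next occupied frame and move it) by a single left-to-right pass that counts every occupied frame appearing after the first free frame and deduplicates labels with a set; B does not mutate mem (the return value is identical).
import Mathlib
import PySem

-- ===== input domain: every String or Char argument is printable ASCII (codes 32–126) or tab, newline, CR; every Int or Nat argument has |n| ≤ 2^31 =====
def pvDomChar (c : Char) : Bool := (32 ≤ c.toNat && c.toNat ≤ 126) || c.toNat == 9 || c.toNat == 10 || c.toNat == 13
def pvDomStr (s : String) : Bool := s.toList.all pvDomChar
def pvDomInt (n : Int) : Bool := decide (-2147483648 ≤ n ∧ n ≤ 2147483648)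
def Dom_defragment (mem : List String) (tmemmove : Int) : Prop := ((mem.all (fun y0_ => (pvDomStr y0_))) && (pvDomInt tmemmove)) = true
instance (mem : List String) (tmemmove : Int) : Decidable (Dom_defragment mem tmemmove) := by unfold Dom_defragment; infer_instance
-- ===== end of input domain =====

-- ===== PORT A =====
-- A mutates its argument `mem` in place; the equivalence proved here is about
-- the RETURN value (movecost, changed) only — B performs no mutation.
-- inner `for j in range(i+1, len(mem))` loop with its `break`
def innerA (tm : Int) (i : Nat) : List Nat → (List String × Int × List String) → (List String × Int × List String)
  | [], st => st
  | j :: rest, (m, cost, ch) =>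
      if m.getD j "." ≠ "." then
        -- `if mem[j] not in changed: changed.append(mem[j])`, the two writes, `movecost += tmemmove`, `break`
        ((m.set i (m.getD j ".")).set j ".", cost + tm,
          if m.getD j "." ∈ ch then ch else ch ++ [m.getD j "."])
      else innerA tm i rest (m, cost, ch)

-- body of the outer `for i in range(len(mem))` loop
def stepA (tm : Int) (st : List String × Int × List String) (i : Nat) : List String × Int × List String :=
  if st.1.getD i "." = "." then innerA tm i (List.range' (i + 1) (st.1.length - (i + 1))) st else st

def defragment (mem : List String) (tmemmove : Int) : Int × List String :=
  let st := (List.range mem.length).foldl (stepA tmemmove) (mem, 0, [])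
  (st.2.1, st.2.2)

-- ===== PORT B =====
-- state: (movecost, changed, seen, free_seen)
def stepB (tm : Int) (st : Int × List String × PySem.Set String × Bool) (x : String) :
    Int × List String × PySem.Set String × Bool :=
  let (cost, ch, seen, free) := st
  if x = "." then (cost, ch, seen, true)
  else if free then
    if PySem.Set.contains seen x then (cost + tm, ch, seen, free)
    else (cost + tm, ch ++ [x], PySem.Set.add seen x, free)
  else st

def defragment_alt (mem : List String) (tmemmove : Int) : Int × List String :=
  let st := mem.foldl (stepB tmemmove) (0, [], PySem.Set.empty, false)
  (st.1, st.2.1)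

-- ===== PRECONDITION & SPEC =====
def Spec_defragment (mem : List String) (tmemmove : Int) (out : Int × List String) : Prop := out = defragment_alt mem tmemmove
instance (mem : List String) (tmemmove : Int) (out : Int × List String) : Decidable (Spec_defragment mem tmemmove out) := by unfold Spec_defragment; infer_instance

-- ===== CLAIM (what is proved, stated in full; the proofs are below) =====
def Claim_equal_defragment : Prop := ∀ (mem : List String) (tmemmove : Int), Dom_defragment mem tmemmove → Spec_defragment mem tmemmove (defragment mem tmemmove)

-- ===== LEMMAS AND PROOFS =====

-- abstract "free mode" loop: cost and label list collected from a suffix all of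
-- whose occupied frames get moved
def gB (tm : Int) : List String → Int × List String → Int × List String
  | [], st => st
  | x :: t, (cost, ch) =>
      if x = "." then gB tm t (cost, ch)
      else gB tm t (cost + tm, if x ∈ ch then ch else ch ++ [x])

-- abstract "pre" loop: skip until the first free frame, then gB
def gPre (tm : Int) : List String → Int × List String → Int × List String
  | [], st => st
  | x :: t, st => if x = "." then gB tm t st else gPre tm t st

theorem gB_dots (tm : Int) (D : List String) (hD : ∀ x ∈ D, x = ".") (t : List String)
    (st : Int × List String) : gB tm (D ++ t) st = gB tm t st := by
  induction D with
  | nil => rfl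
  | cons e D ih =>
      obtain ⟨c, l⟩ := st
      have he : e = "." := hD e (by simp)
      simp [gB, he, ih (fun x hx => hD x (by simp [hx]))]

theorem gB_all_dots (tm : Int) (t : List String) (ht : ∀ x ∈ t, x = ".")
    (st : Int × List String) : gB tm t st = st := by
  have := gB_dots tm t ht [] st
  simpa using this

theorem split_dots (t : List String) :
    (∀ x ∈ t, x = ".") ∨ ∃ D v t'', t = D ++ v :: t'' ∧ (∀ x ∈ D, x = ".") ∧ v ≠ "." := by
  induction t with
  | nil => exact Or.inl (by simp)
  | cons x t ih =>
      by_cases hx : x = "."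
      · rcases ih with h | ⟨D, v, t'', rfl, hD, hv⟩
        · exact Or.inl (by simpa [hx] using h)
        · exact Or.inr ⟨x :: D, v, t'', by simp, by simpa [hx] using hD, hv⟩
      · exact Or.inr ⟨[], x, t, by simp, by simp, hx⟩

theorem getD_append_len (F : List String) (x : String) (t : List String) (d : String) :
    (F ++ x :: t).getD F.length d = x := by
  simp [List.getD_eq_getElem?_getD]

theorem set_append_len (F : List String) (x v : String) (t : List String) :
    (F ++ x :: t).set F.length v = F ++ v :: t := by
  induction F with
  | nil => simp
  | cons a F ih => simp [ih]

theorem set_append_left (F : List String) (u : List String) (i : Nat) (hi : i < F.length)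
    (v : String) : (F ++ u).set i v = F.set i v ++ u := by
  rw [List.set_append]
  simp [hi]

theorem innerA_none (tm : Int) (i : Nat) (E : List String) (hE : ∀ x ∈ E, x = ".")
    (P : List String) (cost : Int) (ch : List String) :
    innerA tm i (List.range' P.length E.length) (P ++ E, cost, ch) = (P ++ E, cost, ch) := by
  induction E generalizing P with
  | nil => rfl
  | cons e E ih =>
      have he : e = "." := hE e (by simp)
      rw [List.length_cons, List.range'_succ]
      simp only [innerA, getD_append_len, he, ne_eq, not_true_eq_false, if_false]
      have := ih (fun x hx => hE x (by simp [hx])) (P ++ ["."])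
      simp only [List.length_append, List.length_cons, List.length_nil, List.append_assoc,
        List.cons_append, List.nil_append, Nat.add_zero, Nat.zero_add] at this ⊢
      exact this

theorem innerA_found (tm : Int) (i : Nat) (E : List String) (hE : ∀ x ∈ E, x = ".")
    (P : List String) (hi : i < P.length) (v : String) (hv : v ≠ ".") (t : List String)
    (cost : Int) (ch : List String) :
    innerA tm i (List.range' P.length (E ++ v :: t).length) (P ++ (E ++ v :: t), cost, ch)
      = (P.set i v ++ (E ++ "." :: t), cost + tm, if v ∈ ch then ch else ch ++ [v]) := by
  induction E generalizing P with
  | nil =>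
      rw [List.nil_append, List.length_cons, List.range'_succ]
      simp only [innerA, getD_append_len, hv, ne_eq, not_false_eq_true, if_true]
      rw [set_append_left P (v :: t) i hi v]
      have hlen : (P.set i v).length = P.length := by simp
      rw [← hlen, set_append_len]
      simp
  | cons e E ih =>
      have he : e = "." := hE e (by simp)
      rw [List.cons_append, List.length_cons, List.range'_succ]
      simp only [innerA, getD_append_len, he, ne_eq, not_true_eq_false, if_false]
      have := ih (fun x hx => hE x (by simp [hx])) (P ++ ["."]) (by simp; omega)
      have h3 : (P ++ ["."]).set i v = P.set i v ++ ["."] := set_append_left P ["."] i hi v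
      rw [h3] at this
      simp only [List.length_append, List.length_cons, List.length_nil, List.append_assoc,
        List.cons_append, List.nil_append, Nat.add_zero, Nat.zero_add] at this ⊢
      exact this

theorem outerA_free (tm : Int) (n : Nat) (t : List String) (d : Nat) (F : List String)
    (cost : Int) (ch : List String) (hn : d + t.length = n)
    (hcond : 1 ≤ d ∨ ∀ x ∈ t, x = ".") :
    ((List.range' F.length (d + t.length)).foldl (stepA tm)
        (F ++ (List.replicate d "." ++ t), cost, ch)).2 = gB tm t (cost, ch) := by
  induction n generalizing t d F cost ch with
  | zero =>
      have hd : d = 0 := by omega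
      have ht : t = [] := by
        cases t with
        | nil => rfl
        | cons a b => simp at hn
      subst hd; subst ht
      simp [gB]
  | succ n ih =>
      cases d with
      | zero =>
          have ht : ∀ x ∈ t, x = "." := by
            rcases hcond with h | h
            · omega
            · exact h
          cases t with
          | nil => simp at hn
          | cons x t' =>
              have hx : x = "." := ht x (by simp)
              subst hx
              rw [show (0 + (("." :: t').length)) = t'.length + 1 by simp, List.range'_succ,
                List.foldl_cons]
              have hstep : stepA tm (F ++ (List.replicate 0 "." ++ "." :: t'), cost, ch) F.length
                  = ((F ++ ["."]) ++ (List.replicate 0 "." ++ t'), cost, ch) := by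
                simp only [stepA, List.replicate, List.nil_append]
                rw [if_pos (by rw [getD_append_len])]
                have hlen : (F ++ "." :: t').length - (F.length + 1) = t'.length := by
                  simp; omega
                rw [hlen]
                have := innerA_none tm F.length t' (fun x hx => ht x (by simp [hx]))
                  (F ++ ["."]) cost ch
                simp only [List.length_append, List.length_cons, List.length_nil,
                  List.append_assoc, List.cons_append, List.nil_append, Nat.add_zero,
                  Nat.zero_add] at this ⊢
                exact this
              simp only [List.replicate, List.nil_append] at hstep ⊢
              rw [hstep]
              have := ih t' 0 (F ++ ["."]) cost ch (by simp at hn ⊢; omega)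
                (Or.inr (fun x hx => ht x (by simp [hx])))
              simp only [List.replicate, List.nil_append, Nat.zero_add] at this
              simp only [List.length_append, List.length_cons, List.length_nil,
                List.append_assoc, List.cons_append, List.nil_append, Nat.add_zero,
                Nat.zero_add] at this ⊢
              rw [this]
              rw [gB_all_dots tm ("." :: t') ht, gB_all_dots tm t' (fun x hx => ht x (by simp [hx]))]
      | succ d' =>
          rw [show (d' + 1 + t.length) = (d' + t.length) + 1 by omega, List.range'_succ,
              List.foldl_cons]
          rcases split_dots t with ht | ⟨D, v, t'', rfl, hD, hv⟩
          · -- no occupied frame remains: inner loop finds nothing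
            have hE : ∀ x ∈ List.replicate d' "." ++ t, x = "." := by
              intro x hx
              rcases List.mem_append.1 hx with h | h
              · exact List.eq_of_mem_replicate h
              · exact ht x h
            have hstep : stepA tm (F ++ (List.replicate (d' + 1) "." ++ t), cost, ch) F.length
                = ((F ++ ["."]) ++ (List.replicate d' "." ++ t), cost, ch) := by
              rw [show List.replicate (d' + 1) "." ++ t = "." :: (List.replicate d' "." ++ t) by
                simp [List.replicate_succ]]
              simp only [stepA]
              rw [if_pos (by rw [getD_append_len])]
              have hlen : (F ++ "." :: (List.replicate d' "." ++ t)).length - (F.length + 1)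
                  = (List.replicate d' "." ++ t).length := by simp; omega
              rw [hlen]
              have := innerA_none tm F.length (List.replicate d' "." ++ t) hE (F ++ ["."]) cost ch
              simp only [List.length_append, List.length_cons, List.length_nil,
                List.append_assoc, List.cons_append, List.nil_append, Nat.add_zero,
                Nat.zero_add] at this ⊢
              exact this
            rw [hstep]
            have := ih t d' (F ++ ["."]) cost ch (by omega)
              (by
                cases d' with
                | zero => exact Or.inr ht
                | succ k => exact Or.inl (by omega))
            simp only [List.length_append, List.length_cons, List.length_nil,
              List.append_assoc, List.cons_append, List.nil_append, Nat.add_zero,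
              Nat.zero_add] at this ⊢
            exact this
          · -- first occupied frame v found after the dots replicate d' ++ D
            have hE : ∀ x ∈ List.replicate d' "." ++ D, x = "." := by
              intro x hx
              rcases List.mem_append.1 hx with h | h
              · exact List.eq_of_mem_replicate h
              · exact hD x h
            have hDrep : D = List.replicate D.length "." := List.eq_replicate_of_mem hD
            have hstep : stepA tm (F ++ (List.replicate (d' + 1) "." ++ (D ++ v :: t'')), cost, ch) F.length
                = ((F ++ [v]) ++ (List.replicate (d' + D.length + 1) "." ++ t''),
                    cost + tm, if v ∈ ch then ch else ch ++ [v]) := by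
              rw [show List.replicate (d' + 1) "." ++ (D ++ v :: t'')
                    = "." :: ((List.replicate d' "." ++ D) ++ v :: t'') by
                  simp [List.replicate_succ]]
              simp only [stepA]
              rw [if_pos (by rw [getD_append_len])]
              have hlen : (F ++ "." :: ((List.replicate d' "." ++ D) ++ v :: t'')).length - (F.length + 1)
                  = ((List.replicate d' "." ++ D) ++ v :: t'').length := by simp; omega
              rw [hlen]
              have := innerA_found tm F.length (List.replicate d' "." ++ D) hE (F ++ ["."])
                (by simp) v hv t'' cost ch
              rw [show (F ++ ["."]).set F.length v = F ++ [v] from set_append_len F "." v []] at this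
              have hfix : (List.replicate d' "." ++ D) ++ "." :: t''
                  = List.replicate (d' + D.length + 1) "." ++ t'' := by
                conv_lhs => rw [hDrep]
                simp [List.replicate_append_replicate, List.replicate_succ', List.append_assoc]
              rw [hfix] at this
              simp only [List.length_append, List.length_cons, List.length_nil,
                List.append_assoc, List.cons_append, List.nil_append, Nat.add_zero,
                Nat.zero_add] at this ⊢
              exact this
            rw [hstep]
            have := ih t'' (d' + D.length + 1) (F ++ [v]) (cost + tm)
              (if v ∈ ch then ch else ch ++ [v]) (by simp at hn ⊢; omega) (Or.inl (by omega))
            rw [show d' + (D ++ v :: t'').length = d' + D.length + 1 + t''.length by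
              simp; omega]
            simp only [List.length_append, List.length_cons, List.length_nil,
              List.append_assoc, List.cons_append, List.nil_append, Nat.add_zero,
              Nat.zero_add] at this ⊢
            rw [this]
            rw [gB_dots tm D hD (v :: t'')]
            simp [gB, hv]


theorem outerA_pre (tm : Int) (t F : List String) (cost : Int) (ch : List String) :
    ((List.range' F.length t.length).foldl (stepA tm) (F ++ t, cost, ch)).2
      = gPre tm t (cost, ch) := by
  induction t generalizing F cost ch with
  | nil => simp [gPre]
  | cons x t ih =>
      rw [List.length_cons, List.range'_succ, List.foldl_cons]
      by_cases hx : x = "."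
      · subst hx
        have := outerA_free tm (1 + t.length) t 1 F cost ch (by omega) (Or.inl (by omega))
        simp only [List.replicate_one, List.cons_append, List.nil_append] at this
        rw [show (1 + t.length) = t.length + 1 by omega, List.range'_succ, List.foldl_cons] at this
        simp only [gPre]
        exact this
      · simp only [stepA]
        rw [if_neg (by rw [getD_append_len]; exact hx)]
        have := ih (F ++ [x]) cost ch
        simp only [gPre, if_neg hx]
        simp only [List.length_append, List.length_cons, List.length_nil, List.append_assoc,
          List.cons_append, List.nil_append, Nat.zero_add] at this ⊢
        exact this

theorem altB_free (tm : Int) (t : List String) (cost : Int) (ch : List String) :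
    t.foldl (stepB tm) (cost, ch, ch, true)
      = ((gB tm t (cost, ch)).1, (gB tm t (cost, ch)).2, (gB tm t (cost, ch)).2, true) := by
  induction t generalizing cost ch with
  | nil => rfl
  | cons x t ih =>
      by_cases hx : x = "."
      · subst hx
        simp only [List.foldl_cons, stepB, gB]
        exact ih cost ch
      · by_cases hm : x ∈ ch
        · have hc : PySem.Set.contains ch x = true := by
            simpa [PySem.Set.contains] using hm
          simp only [List.foldl_cons, stepB, if_neg hx, hc, gB, if_pos hm, if_true]
          exact ih (cost + tm) ch
        · have hc : PySem.Set.contains ch x = false := by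
            simpa [PySem.Set.contains] using hm
          have hadd : PySem.Set.add ch x = ch ++ [x] := PySem.Set.add_of_not_mem hm
          simp only [List.foldl_cons, stepB, if_neg hx, hc, gB, if_neg hm,
            Bool.false_eq_true, if_false, if_true, hadd]
          exact ih (cost + tm) (ch ++ [x])

theorem altB_pre (tm : Int) (t : List String) (cost : Int) (ch : List String) :
    ((t.foldl (stepB tm) (cost, ch, ch, false)).1, (t.foldl (stepB tm) (cost, ch, ch, false)).2.1)
      = gPre tm t (cost, ch) := by
  induction t generalizing cost ch with
  | nil => simp [gPre]
  | cons x t ih =>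
      by_cases hx : x = "."
      · subst hx
        simp only [List.foldl_cons, stepB, gPre, if_true]
        rw [altB_free]
      · simp only [List.foldl_cons, stepB, if_neg hx, Bool.false_eq_true, if_false, gPre]
        exact ih cost ch

-- ===== VERDICT (by name: the statement is the Claim_ definition above) =====
theorem defragment_spec : Claim_equal_defragment := by
  intro mem tm _
  unfold Spec_defragment defragment defragment_alt
  dsimp only
  rw [List.range_eq_range']
  have hA := outerA_pre tm mem [] 0 []
  simp only [List.nil_append, List.length_nil] at hA
  have hB := altB_pre tm mem 0 []
  exact hA.trans hB.symm
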